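-- pv_equiv track=rewrite | github.com/watersmark/yandex_practicum_python | practise/sprint_2/context_problem/cata_5/main.py | is_a_valid_message
-- ===== SOURCE A (Python) =====
-- def is_a_valid_message(message):
--     mass = ['1','2','3','4','5','6','7','8','9','0']
--
--     if message == "":
--         return True
--
--     if message[0] not in mass:
--         return False
--
--     if message[len(message) - 1] in mass:
--         return False
--
--     digit = ""
--     count_word = 0
--     digit_int = 0
--     is_bool = True
--
--     for elem in message:
--         if elem in mass:
--
--             if is_bool:
--                 if count_word == digit_int:
--                     digit = ""
--                     count_word = 0
--                     digit_int = 0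
--
--                     if elem == '0':
--                         return False
--                 else:
--                     return False
--
--             digit += elem
--             is_bool = False
--         else:
--             is_bool = True
--             digit_int = int(digit)
--             count_word += 1
--
--     if count_word != digit_int:
--         return False
--
--     return True
-- ===== SOURCE B (Python) =====
-- def is_a_valid_message(message):
--     digits = set('0123456789')
--     i, n = 0, len(message)
--     while i < n:
--         # each chunk must start with a digit run whose first digit is not '0'
--         if message[i] not in digits or message[i] == '0':
--             return False
--         j = i
--         while j < n and message[j] in digits:
--             j += 1
--         k = j
--         while k < n and message[k] not in digits:
--             k += 1
--         if k == j or int(message[i:j]) != k - j: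
--             return False
--         i = k
--     return True
-- ===== Notes on version B (the rewrite author's own statement) =====
-- stated objective: alternative
-- what changed: Replaced A's per-character flag-driven state machine (digit buffer, word counter, is_bool flag) with chunked parsing: an index loop that reads a whole digit run, then reads exactly the following non-digit run and checks int(prefix) == run length.
import Mathlib
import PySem

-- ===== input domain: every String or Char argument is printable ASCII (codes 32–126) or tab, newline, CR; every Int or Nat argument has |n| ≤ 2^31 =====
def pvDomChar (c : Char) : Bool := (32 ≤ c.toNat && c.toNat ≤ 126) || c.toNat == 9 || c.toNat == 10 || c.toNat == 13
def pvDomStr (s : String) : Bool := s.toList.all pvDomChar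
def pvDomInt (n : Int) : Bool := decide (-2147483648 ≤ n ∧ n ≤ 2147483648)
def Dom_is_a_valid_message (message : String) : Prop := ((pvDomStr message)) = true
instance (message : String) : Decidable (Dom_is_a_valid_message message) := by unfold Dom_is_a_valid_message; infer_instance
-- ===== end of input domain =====

-- B replaces A's flag-driven per-character state machine by chunked parsing (read a digit run,
-- read that many non-digit chars, repeat); same return value, no speed claim.

-- ===== PORT A =====
-- mass = ['1','2','3','4','5','6','7','8','9','0']
def massA : List Char := ['1','2','3','4','5','6','7','8','9','0']

-- loop state: (digit, count_word, digit_int, is_bool); none = "return False" happened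
def stepA (st : Option (List Char × Int × Int × Bool)) (elem : Char) :
    Option (List Char × Int × Int × Bool) :=
  match st with
  | none => none
  | some (digit, count_word, digit_int, is_bool) =>
    if elem ∈ massA then
      if is_bool then
        if count_word = digit_int then
          if elem = '0' then none
          else some ([elem], 0, 0, false)
        else none
      else some (digit ++ [elem], count_word, digit_int, false)
    else
      -- digit is provably a nonempty run of digits whenever this branch runs, so int(digit) cannot raise
      some (digit, count_word + 1, (PySem.Int.ofStr? (String.ofList digit)).getD 0, true)

def is_a_valid_message (message : String) : Bool :=
  if message = "" then true
  else
    let cs := message.toList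
    if (cs.headD ' ') ∉ massA then false
    else if (cs.getLastD ' ') ∈ massA then false
    else
      match cs.foldl stepA (some ([], 0, 0, true)) with
      | none => false
      | some (_, count_word, digit_int, _) =>
        if count_word ≠ digit_int then false else true

-- ===== PORT B =====
def isDigB (c : Char) : Bool := c ∈ ['0','1','2','3','4','5','6','7','8','9']

-- the while loop of Source B: the index i becomes the remaining suffix of the char list
def goB : List Char → Bool
  | [] => true
  | c :: rest =>
    if h : ¬ isDigB c ∨ c = '0' then false
    else
      let drun := (c :: rest).takeWhile isDigB
      let after := (c :: rest).dropWhile isDigB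
      let wrun := after.takeWhile (fun x => ! isDigB x)
      let rest2 := after.dropWhile (fun x => ! isDigB x)
      if wrun = [] then false
      else if (PySem.Int.ofStr? (String.ofList drun)).getD 0 ≠ (wrun.length : Int) then false
      else goB rest2
  termination_by cs => cs.length
  decreasing_by
    have hc : isDigB c = true := by
      by_contra h'; exact h (Or.inl (by simp [h']))
    simp only [List.length_cons]
    calc (((c :: rest).dropWhile isDigB).dropWhile (fun x => ! isDigB x)).length
        ≤ ((c :: rest).dropWhile isDigB).length := List.length_dropWhile_le _ _
      _ = (rest.dropWhile isDigB).length := by simp [List.dropWhile, hc]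
      _ ≤ rest.length := List.length_dropWhile_le _ _
      _ < rest.length + 1 := Nat.lt_succ_self _

def is_a_valid_message_alt (message : String) : Bool := goB message.toList

-- ===== PRECONDITION & SPEC =====
def Spec_is_a_valid_message (message : String) (out : Bool) : Prop := out = is_a_valid_message_alt message
instance (message : String) (out : Bool) : Decidable (Spec_is_a_valid_message message out) := by unfold Spec_is_a_valid_message; infer_instance

-- ===== CLAIM (what is proved, stated in full; the proofs are below) =====
def Claim_equal_is_a_valid_message : Prop := ∀ (message : String), Dom_is_a_valid_message message → Spec_is_a_valid_message message (is_a_valid_message message)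

-- ===== LEMMAS AND PROOFS =====

-- helpers for the proofs
def intvalP (s : List Char) : Int := (PySem.Int.ofStr? (String.ofList s)).getD 0

def finA (st : Option (List Char × Int × Int × Bool)) : Bool :=
  match st with
  | none => false
  | some (_, count_word, digit_int, _) => if count_word ≠ digit_int then false else true

def AresFrom (st : List Char × Int × Int × Bool) (cs : List Char) : Bool :=
  finA (cs.foldl stepA (some st))

theorem mem_massA_iff (c : Char) : c ∈ massA ↔ isDigB c = true := by
  simp [massA, isDigB]; tauto

theorem goB_cons_false (c : Char) (t : List Char) (h : ¬ isDigB c = true ∨ c = '0') :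
    goB (c :: t) = false := by
  rw [goB, dif_pos h]

theorem goB_cons_eq (c : Char) (t : List Char) (h1 : isDigB c = true) (h2 : ¬ c = '0') :
    goB (c :: t) =
      (if (t.dropWhile isDigB).takeWhile (fun x => ! isDigB x) = [] then false
       else if (PySem.Int.ofStr? (String.ofList (c :: t.takeWhile isDigB))).getD 0
             ≠ (((t.dropWhile isDigB).takeWhile (fun x => ! isDigB x)).length : Int) then false
       else goB ((t.dropWhile isDigB).dropWhile (fun x => ! isDigB x))) := by
  rw [goB, dif_neg (by simp [h1, h2]), List.dropWhile_cons_of_pos (by simp [h1]),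
    List.takeWhile_cons_of_pos (by simp [h1])]

theorem foldl_stepA_none (l : List Char) : l.foldl stepA none = none := by
  induction l with
  | nil => rfl
  | cons x xs ih => simpa [stepA] using ih

theorem foldl_stepA_digits (d : List Char) (hd : ∀ x ∈ d, x ∈ massA) :
    ∀ (s : List Char) (cw di : Int),
    d.foldl stepA (some (s, cw, di, false)) = some (s ++ d, cw, di, false) := by
  induction d with
  | nil => intro s cw di; simp
  | cons x xs ih =>
    intro s cw di
    have hx : x ∈ massA := hd x (by simp)
    have hxs : ∀ y ∈ xs, y ∈ massA := fun y hy => hd y (by simp [hy])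
    simp only [List.foldl_cons, stepA, if_pos hx, if_neg (by simp : ¬ (false = true))]
    rw [ih hxs]
    simp

theorem foldl_stepA_words (w : List Char) (hw : ∀ x ∈ w, x ∉ massA) :
    ∀ (s : List Char) (cw : Int),
    w.foldl stepA (some (s, cw, intvalP s, true)) = some (s, cw + w.length, intvalP s, true) := by
  induction w with
  | nil => intro s cw; simp
  | cons x xs ih =>
    intro s cw
    have hx : x ∉ massA := hw x (by simp)
    have hxs : ∀ y ∈ xs, y ∉ massA := fun y hy => hw y (by simp [hy])
    simp only [List.foldl_cons, stepA, if_neg hx]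
    rw [show ((PySem.Int.ofStr? (String.ofList s)).getD 0) = intvalP s from rfl, ih hxs]
    simp [List.length_cons]
    ring

theorem foldl_stepA_words' (w : List Char) (hne : w ≠ []) (hw : ∀ x ∈ w, x ∉ massA)
    (s : List Char) (cw di : Int) (b : Bool) :
    w.foldl stepA (some (s, cw, di, b)) = some (s, cw + w.length, intvalP s, true) := by
  cases w with
  | nil => exact absurd rfl hne
  | cons x xs =>
    have hx : x ∉ massA := hw x (by simp)
    have hxs : ∀ y ∈ xs, y ∉ massA := fun y hy => hw y (by simp [hy])
    simp only [List.foldl_cons, stepA, if_neg hx]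
    rw [show ((PySem.Int.ofStr? (String.ofList s)).getD 0) = intvalP s from rfl,
      foldl_stepA_words xs hxs]
    simp [List.length_cons]
    ring

theorem AresFrom_bad (cs : List Char) (s : List Char) (cw di : Int) (hne : cw ≠ di)
    (hhead : cs = [] ∨ ∃ c t, cs = c :: t ∧ c ∈ massA) :
    AresFrom (s, cw, di, true) cs = false := by
  rcases hhead with h | ⟨c, t, rfl, hc⟩
  · subst h; simp [AresFrom, finA, hne]
  · simp only [AresFrom, List.foldl_cons, stepA, if_pos hc, if_neg hne]
    simp [foldl_stepA_none, finA]

theorem dropWhile_head_false {α : Type} (p : α → Bool) (l : List α) (x : α) (xs : List α)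
    (h : l.dropWhile p = x :: xs) : p x = false := by
  induction l with
  | nil => simp [List.dropWhile] at h
  | cons y ys ih =>
    by_cases hy : p y
    · exact ih (by simpa [List.dropWhile, hy] using h)
    · rw [List.dropWhile_cons_of_neg (by simpa using hy)] at h
      cases h; simpa using hy

theorem getLastD_append_right {α : Type} (l m : List α) (v : α) (hm : m ≠ []) :
    (l ++ m).getLastD v = m.getLastD v := by
  cases m with
  | nil => exact absurd rfl hm
  | cons y ys =>
    rw [List.getLastD_eq_getLast?, List.getLastD_eq_getLast?, List.getLast?_append_of_ne_nil]
    simp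

theorem getLastD_mem {α : Type} (l : List α) (v : α) (hne : l ≠ []) : l.getLastD v ∈ l := by
  rw [List.getLastD_eq_getLast?]
  cases hl : l.getLast? with
  | none => exact absurd (List.getLast?_eq_none_iff.mp hl) hne
  | some y => simpa using List.mem_of_getLast? hl

theorem getLastD_mem_of_all (l : List Char) (hne : l ≠ []) (hd : ∀ x ∈ l, x ∈ massA) :
    l.getLastD ' ' ∈ massA := by
  rw [List.getLastD_eq_getLast?]
  cases hl : l.getLast? with
  | none => exact absurd (List.getLast?_eq_none_iff.mp hl) hne
  | some y => exact hd y (List.mem_of_getLast? hl)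

theorem goB_last_digit : ∀ (n : Nat) (cs : List Char), cs.length ≤ n → cs ≠ [] →
    cs.getLastD ' ' ∈ massA → goB cs = false := by
  intro n
  induction n with
  | zero =>
    intro cs hlen hne _
    exact absurd (List.eq_nil_of_length_eq_zero (Nat.le_zero.mp hlen)) hne
  | succ n ih =>
    intro cs hlen hne hlast
    cases cs with
    | nil => exact absurd rfl hne
    | cons c t =>
      by_cases hcond : ¬ isDigB c = true ∨ c = '0'
      · exact goB_cons_false c t hcond
      · obtain ⟨h1, h2⟩ := not_or.mp hcond
        rw [goB_cons_eq c t (by simpa using h1) h2]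
        set a := t.dropWhile isDigB with ha
        cases haa : a.takeWhile (fun x => ! isDigB x) with
        | nil => simp
        | cons x xs =>
          rw [if_neg (by simp)]
          cases hrr : a.dropWhile (fun x => ! isDigB x) with
          | nil =>
            -- then c :: t = digits ++ wrun, whose last char is a non-digit: contradiction
            exfalso
            have hsplit : c :: t = (c :: t.takeWhile isDigB) ++ (x :: xs) := by
              conv_lhs => rw [show t = t.takeWhile isDigB ++ a from (List.takeWhile_append_dropWhile).symm]
              rw [show a = a.takeWhile (fun x => ! isDigB x) ++ a.dropWhile (fun x => ! isDigB x)
                from (List.takeWhile_append_dropWhile).symm, haa, hrr]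
              simp
            have hlast' : (c :: t).getLastD ' ' = (x :: xs).getLastD ' ' := by
              rw [hsplit]; exact getLastD_append_right _ _ _ (by simp)
            have hmem : (x :: xs).getLastD ' ' ∈ massA := by rw [← hlast']; exact hlast
            have hall : ∀ y ∈ (x :: xs), y ∉ massA := by
              intro y hy
              have := List.mem_takeWhile_imp (p := fun x => ! isDigB x) (haa ▸ hy)
              simp only [Bool.not_eq_true'] at this
              simp [mem_massA_iff, this]
            exact hall _ (getLastD_mem _ ' ' (by simp)) hmem
          | cons y ys =>
            -- last char of cs lies in rest2; recurse
            have hsuffix : c :: t = ((c :: t.takeWhile isDigB) ++ (x :: xs)) ++ (y :: ys) := by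
              conv_lhs => rw [show t = t.takeWhile isDigB ++ a from (List.takeWhile_append_dropWhile).symm]
              rw [show a = a.takeWhile (fun x => ! isDigB x) ++ a.dropWhile (fun x => ! isDigB x)
                from (List.takeWhile_append_dropWhile).symm, haa, hrr]
              simp
            have hlen2 : (y :: ys).length ≤ n := by
              have := congrArg List.length hsuffix
              simp only [List.length_cons, List.length_append] at this hlen ⊢
              omega
            have := ih (y :: ys) hlen2 (by simp) (by
              rw [hsuffix] at hlast
              rwa [getLastD_append_right _ _ _ (by simp)] at hlast)
            rw [this]
            split <;> rfl

theorem main_equiv : ∀ (n : Nat) (cs : List Char), cs.length ≤ n →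
    (cs = [] ∨ ∃ c t, cs = c :: t ∧ c ∈ massA) →
    (cs = [] ∨ cs.getLastD ' ' ∉ massA) →
    ∀ (s : List Char) (cw : Int),
    AresFrom (s, cw, cw, true) cs = goB cs := by
  intro n
  induction n with
  | zero =>
    intro cs hlen _ _ s cw
    have h0 : cs = [] := List.eq_nil_of_length_eq_zero (Nat.le_zero.mp hlen)
    subst h0
    simp [AresFrom, finA, goB]
  | succ n ih =>
    intro cs hlen hhead hlast s cw
    rcases hhead with rfl | ⟨c, t, rfl, hc⟩
    · simp [AresFrom, finA, goB]
    · have h1 : isDigB c = true := (mem_massA_iff c).mp hc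
      by_cases h2 : c = '0'
      · rw [goB_cons_false c t (Or.inr h2)]
        subst h2
        simp [AresFrom, stepA, hc, foldl_stepA_none, finA]
      · rw [goB_cons_eq c t h1 h2]
        have hlast' : (c :: t).getLastD ' ' ∉ massA := hlast.resolve_left (by simp)
        set a := t.dropWhile isDigB with ha
        have hsplit_t : t = t.takeWhile isDigB ++ a := (List.takeWhile_append_dropWhile).symm
        have hdigs : ∀ x ∈ t.takeWhile isDigB, x ∈ massA := by
          intro x hx
          exact (mem_massA_iff x).mpr (List.mem_takeWhile_imp hx)
        have hstep1 : stepA (some (s, cw, cw, true)) c = some ([c], 0, 0, false) := by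
          simp [stepA, hc, h2]
        cases haa : a.takeWhile (fun x => ! isDigB x) with
        | nil =>
          exfalso
          have ha0 : a = [] := by
            cases haz : a with
            | nil => rfl
            | cons z zs =>
              have hz : isDigB z = false := dropWhile_head_false isDigB t z zs (ha ▸ haz)
              rw [haz, List.takeWhile_cons_of_pos (by simp [hz])] at haa
              cases haa
          apply hlast'
          apply getLastD_mem_of_all _ (by simp)
          intro x hx
          rcases List.mem_cons.mp hx with rfl | hx'
          · exact hc
          · rw [hsplit_t, ha0, List.append_nil] at hx'
            exact hdigs x hx'
        | cons x xs =>
          have hwall : ∀ y ∈ (x :: xs), y ∉ massA := by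
            intro y hy
            have hy' := List.mem_takeWhile_imp (p := fun x => ! isDigB x) (haa ▸ hy)
            simp only [Bool.not_eq_true'] at hy'
            simp [mem_massA_iff, hy']
          set rest2 := a.dropWhile (fun x => ! isDigB x) with hr
          have hsplit_a : a = (x :: xs) ++ rest2 := by
            conv_lhs => rw [← List.takeWhile_append_dropWhile (p := fun x => ! isDigB x) (l := a)]
            rw [haa]
          have hsuffix : c :: t = ((c :: t.takeWhile isDigB) ++ (x :: xs)) ++ rest2 := by
            conv_lhs => rw [hsplit_t, hsplit_a]
            simp
          have hrhead : rest2 = [] ∨ ∃ z zs, rest2 = z :: zs ∧ z ∈ massA := by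
            cases hrz : rest2 with
            | nil => exact Or.inl rfl
            | cons z zs =>
              refine Or.inr ⟨z, zs, rfl, ?_⟩
              have hz := dropWhile_head_false (fun x => ! isDigB x) a z zs (hr ▸ hrz)
              simp only [Bool.not_eq_false'] at hz
              exact (mem_massA_iff z).mpr hz
          have hA : (c :: t).foldl stepA (some (s, cw, cw, true))
              = rest2.foldl stepA
                  (some (c :: t.takeWhile isDigB, (0 : Int) + ((x :: xs).length : Int),
                    intvalP (c :: t.takeWhile isDigB), true)) := by
            rw [List.foldl_cons, hstep1]
            conv_lhs => rw [hsplit_t, hsplit_a, ← List.append_assoc]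
            rw [List.foldl_append, List.foldl_append, foldl_stepA_digits _ hdigs,
              foldl_stepA_words' (x :: xs) (by simp) hwall]
            rfl
          have hAres : AresFrom (s, cw, cw, true) (c :: t)
              = AresFrom (c :: t.takeWhile isDigB, (0 : Int) + ((x :: xs).length : Int),
                  intvalP (c :: t.takeWhile isDigB), true) rest2 := congrArg finA hA
          rw [if_neg (by simp : ¬ (x :: xs) = [])]
          by_cases hmatch : intvalP (c :: t.takeWhile isDigB) = (((x :: xs).length : Nat) : Int)
          · rw [if_neg (by
              show ¬ ((PySem.Int.ofStr? (String.ofList (c :: t.takeWhile isDigB))).getD 0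
                ≠ (((x :: xs).length : Nat) : Int))
              simpa [intvalP] using hmatch)]
            rw [hAres, hmatch]
            have hzero : (0 : Int) + (((x :: xs).length : Nat) : Int) = (((x :: xs).length : Nat) : Int) := by ring
            rw [hzero]
            apply ih rest2
            · have hlc := congrArg List.length hsuffix
              simp only [List.length_cons, List.length_append] at hlc hlen ⊢
              omega
            · exact hrhead
            · cases hrz : rest2 with
              | nil => exact Or.inl rfl
              | cons z zs =>
                refine Or.inr ?_
                rw [← hrz]
                rw [hsuffix] at hlast'
                rwa [getLastD_append_right _ _ _ (by rw [hrz]; simp)] at hlast'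
          · rw [if_pos (by
              show ((PySem.Int.ofStr? (String.ofList (c :: t.takeWhile isDigB))).getD 0
                ≠ (((x :: xs).length : Nat) : Int))
              simpa [intvalP] using hmatch)]
            rw [hAres]
            apply AresFrom_bad
            · intro hEq
              exact hmatch (by rw [← hEq]; ring)
            · exact hrhead

theorem match_finA (st : Option (List Char × Int × Int × Bool)) :
    (match st with
     | none => false
     | some (_, count_word, digit_int, _) => if count_word ≠ digit_int then false else true)
    = finA st := rfl

-- ===== VERDICT (by name: the statement is the Claim_ definition above) =====
theorem is_a_valid_message_spec : Claim_equal_is_a_valid_message := by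
  intro message _
  show is_a_valid_message message = is_a_valid_message_alt message
  unfold is_a_valid_message is_a_valid_message_alt
  by_cases hempty : message = ""
  · subst hempty
    simp [goB]
  · rw [if_neg hempty]
    cases hcs : message.toList with
    | nil =>
      exfalso
      apply hempty
      have := congrArg String.ofList hcs
      simpa using this
    | cons c t =>
      simp only [List.headD_cons]
      by_cases hc : c ∈ massA
      · rw [if_neg (by simp [hc])]
        by_cases hl : (c :: t).getLastD ' ' ∈ massA
        · rw [if_pos hl, goB_last_digit (c :: t).length (c :: t) le_rfl (by simp) hl]
        · rw [if_neg hl, match_finA]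
          exact main_equiv (c :: t).length (c :: t) le_rfl
            (Or.inr ⟨c, t, rfl, hc⟩) (Or.inr hl) [] 0
      · rw [if_pos (by simp [hc]),
          goB_cons_false c t (Or.inl (by simpa [mem_massA_iff] using hc))]
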